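-- pv_equiv track=rewrite | github.com/daniel-reich/ubiquitous-fiesta | Y4gwcGfcGb3SKz6Tu_16.py | max_separator
-- ===== SOURCE A (Python) =====
-- def max_separator(txt):
--   li = list(set([x for x in [char for char in txt] if [char for char in txt].count(x) > 1]))
--   out = []
--   length = 0
--   for i in li:
--     subs = txt[txt.find(i):txt.rfind(i)]
--     if max(len(j) for j in subs.split(i)) > length:
--       length = max(len(j) for j in subs.split(i))
--       out.clear()
--       out.append(i)
--     elif max(len(j) for j in subs.split(i)) == length:
--       out.append(i)
--   return sorted(out)
-- ===== SOURCE B (Python) =====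
-- def max_separator(txt):
--     last = {}
--     gap = {}
--     for i, c in enumerate(txt):
--         if c in last:
--             g = i - last[c] - 1
--             if c not in gap or g > gap[c]:
--                 gap[c] = g
--         last[c] = i
--     if len(gap) == 0:
--         return []
--     m = max(gap.values())
--     return sorted(c for c, g in gap.items() if g == m)
-- ===== Notes on version B (the rewrite author's own statement) =====
-- stated objective: faster
-- what changed: Replaces the per-character find/rfind/slice/split rescans of the whole string with a single left-to-right pass that keeps, per character, its last position and its maximal gap in two dicts, then selects the characters with the overall maximal gap.
import Mathlib
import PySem

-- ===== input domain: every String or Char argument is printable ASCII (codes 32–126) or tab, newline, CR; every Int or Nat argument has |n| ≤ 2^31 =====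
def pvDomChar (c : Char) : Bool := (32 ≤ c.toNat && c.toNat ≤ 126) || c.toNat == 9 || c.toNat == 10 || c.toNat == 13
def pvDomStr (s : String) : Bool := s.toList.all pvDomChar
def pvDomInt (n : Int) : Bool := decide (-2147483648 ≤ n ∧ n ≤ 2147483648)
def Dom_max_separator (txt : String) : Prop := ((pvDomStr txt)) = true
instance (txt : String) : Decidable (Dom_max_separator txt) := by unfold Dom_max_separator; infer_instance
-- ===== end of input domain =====

-- B replaces A's per-character find/rfind/slice/split rescans by one left-to-right pass with
-- two dicts (last position and maximal gap per character); objective: faster (O(n^2) -> O(n)).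

-- ===== PORT A =====
def max_separator (txt : String) : List String :=
  let chars : List String := txt.toList.map (fun ch => String.ofList [ch])
  let li : List String := PySem.Set.ofList (chars.filter (fun x => chars.count x > 1))
  let res := li.foldl (fun (st : List String × Int) i =>
    let subs := PySem.Str.slice txt (some (PySem.Str.find txt i)) (some (PySem.Str.rfind txt i))
    -- max(len(j) for j in subs.split(i)): i is a 1-char string, so split(i) never raises and
    -- the piece list is never empty; the getD defaults are unreachable
    let m := (PySem.List.max? (((PySem.Str.split? subs i).getD []).map
                (fun j => PySem.Str.len j)) (fun x => x)).getD 0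
    if m > st.2 then ([i], m)
    else if m == st.2 then (st.1 ++ [i], st.2)
    else st) ([], 0)
  PySem.List.sorted res.1 (fun x => x) false

-- ===== PORT B =====
-- B-side helper: the body of B's single for-loop over enumerate(txt)
def stepB (st : PySem.Dict Char Int × PySem.Dict Char Int) (p : Int × Char) :
    PySem.Dict Char Int × PySem.Dict Char Int :=
  let last := st.1
  let gap := st.2
  let gap := if last.contains p.2 then
      let g := p.1 - last.getD p.2 0 - 1
      if !gap.contains p.2 || g > gap.getD p.2 0 then gap.insert p.2 g else gap
    else gap
  (last.insert p.2 p.1, gap)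

def max_separator_alt (txt : String) : List String :=
  let st := (PySem.List.enumerate txt.toList).foldl stepB (PySem.Dict.empty, PySem.Dict.empty)
  let gap := st.2
  if gap.size = 0 then []
  else
    let m := (PySem.List.max? gap.values (fun x => x)).getD 0
    PySem.List.sorted ((gap.items.filter (fun p => p.2 == m)).map
      (fun p => String.ofList [p.1])) (fun x => x) false

-- ===== PRECONDITION & SPEC =====
def Spec_max_separator (txt : String) (out : List String) : Prop := out = max_separator_alt txt
instance (txt : String) (out : List String) : Decidable (Spec_max_separator txt out) := by unfold Spec_max_separator; infer_instance

-- ===== CLAIM (what is proved, stated in full; the proofs are below) =====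
def Claim_equal_max_separator : Prop := ∀ (txt : String), Dom_max_separator txt → Spec_max_separator txt (max_separator txt)

-- ===== LEMMAS AND PROOFS =====

-- Python's s.split(c) for a single character c, as a structural recursion
def pySplitc (c : Char) : List Char → List (List Char)
  | [] => [[]]
  | x :: xs =>
    if x = c then [] :: pySplitc c xs
    else (x :: (pySplitc c xs).headI) :: (pySplitc c xs).tail

-- inverse of pySplitc: glue pieces with the separator char
def glue (c : Char) : List (List Char) → List Char
  | [] => []
  | [p] => p
  | p :: q :: ps => p ++ c :: glue c (q :: ps)

-- the common specification value: maximal length of an interior piece (= maximal gap)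
def gmaxI (c : Char) (l : List Char) : Int :=
  (((pySplitc c l).tail.dropLast).map (fun p => (p.length : Int))).foldl max 0

-- the value A's loop computes for the 1-char string i
def valA (txt i : String) : Int :=
  (PySem.List.max? (((PySem.Str.split? (PySem.Str.slice txt (some (PySem.Str.find txt i))
      (some (PySem.Str.rfind txt i))) i).getD []).map
      (fun j => PySem.Str.len j)) (fun x => x)).getD 0

theorem ps_cons_pos (c : Char) (xs : List Char) :
    pySplitc c (c :: xs) = [] :: pySplitc c xs := by simp [pySplitc]

theorem ps_cons_neg {x c : Char} (h : x ≠ c) (xs : List Char) :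
    pySplitc c (x :: xs) = (x :: (pySplitc c xs).headI) :: (pySplitc c xs).tail := by
  simp [pySplitc, h]

theorem ps_ne_nil (c : Char) (l : List Char) : pySplitc c l ≠ [] := by
  cases l with
  | nil => simp [pySplitc]
  | cons x xs =>
    by_cases h : x = c
    · subst h; simp [ps_cons_pos]
    · simp [ps_cons_neg h]

theorem headI_tail {α : Type} [Inhabited α] {ps : List α} (h : ps ≠ []) :
    ps.headI :: ps.tail = ps := by
  cases ps with
  | nil => exact absurd rfl h
  | cons a t => rfl

theorem headI_mem {α : Type} [Inhabited α] {ps : List α} (h : ps ≠ []) : ps.headI ∈ ps := by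
  cases ps with
  | nil => exact absurd rfl h
  | cons a t => simp [List.headI]

theorem dropLast_getLastD {ps : List (List Char)} (h : ps ≠ []) :
    ps.dropLast ++ [ps.getLastD []] = ps := by
  induction ps using List.reverseRecOn with
  | nil => exact absurd rfl h
  | append_singleton qs y _ => simp [List.getLastD_concat]

theorem glue_singleton (c : Char) (p : List Char) : glue c [p] = p := rfl

theorem glue_cons (c : Char) (p : List Char) {ts : List (List Char)} (h : ts ≠ []) :
    glue c (p :: ts) = p ++ c :: glue c ts := by
  cases ts with
  | nil => exact absurd rfl h
  | cons q ps => rfl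

theorem glue_push (c : Char) (x : Char) (hd : List Char) (tl : List (List Char)) :
    glue c ((x :: hd) :: tl) = x :: glue c (hd :: tl) := by
  cases tl with
  | nil => rfl
  | cons q ps => rw [glue_cons c (x :: hd) (by simp), glue_cons c hd (by simp)]; simp

theorem glue_concat (c : Char) {qs : List (List Char)} (r : List Char) (h : qs ≠ []) :
    glue c (qs ++ [r]) = glue c qs ++ c :: r := by
  induction qs with
  | nil => exact absurd rfl h
  | cons p ts ih =>
    cases ts with
    | nil => rfl
    | cons q ps =>
      rw [List.cons_append, glue_cons c p (by simp), ih (by simp), glue_cons c p (by simp)]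
      simp

theorem glue_ps (c : Char) (l : List Char) : glue c (pySplitc c l) = l := by
  induction l with
  | nil => rfl
  | cons x xs ih =>
    by_cases hx : x = c
    · subst hx
      rw [ps_cons_pos, glue_cons x [] (ps_ne_nil x xs), ih]
      rfl
    · rw [ps_cons_neg hx, glue_push, headI_tail (ps_ne_nil c xs), ih]

theorem not_mem_ps (c : Char) (l : List Char) : ∀ p ∈ pySplitc c l, c ∉ p := by
  induction l with
  | nil => intro p hp; simp [pySplitc] at hp; simp [hp]
  | cons x xs ih =>
    intro p hp
    by_cases hx : x = c
    · subst hx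
      rw [ps_cons_pos] at hp
      rcases List.mem_cons.mp hp with hp | hp
      · simp [hp]
      · exact ih p hp
    · rw [ps_cons_neg hx] at hp
      rcases List.mem_cons.mp hp with hp | hp
      · subst hp
        intro hc
        rcases List.mem_cons.mp hc with hc | hc
        · exact hx hc.symm
        · exact ih _ (headI_mem (ps_ne_nil c xs)) hc
      · exact ih p (List.mem_of_mem_tail hp)

theorem length_ps (c : Char) (l : List Char) : (pySplitc c l).length = l.count c + 1 := by
  induction l with
  | nil => simp [pySplitc]
  | cons x xs ih =>
    by_cases hx : x = c
    · subst hx; simp [ps_cons_pos, ih, List.count_cons]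
    · rw [ps_cons_neg hx]
      simp [List.count_cons, hx, List.length_tail, ← ih]
      have := ps_ne_nil c xs
      omega

theorem ps_prepend (c : Char) {p : List Char} (h : c ∉ p) (l : List Char) :
    pySplitc c (p ++ l) = (p ++ (pySplitc c l).headI) :: (pySplitc c l).tail := by
  induction p with
  | nil => simpa using (headI_tail (ps_ne_nil c l)).symm
  | cons a p ih =>
    have ha : a ≠ c := fun hc => h (by simp [hc])
    rw [List.cons_append, ps_cons_neg ha, ih (fun hc => h (List.mem_cons_of_mem _ hc))]
    simp

theorem ps_glue (c : Char) : ∀ ps : List (List Char), ps ≠ [] → (∀ p ∈ ps, c ∉ p) →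
    pySplitc c (glue c ps) = ps := by
  intro ps
  induction ps with
  | nil => intro h; exact absurd rfl h
  | cons p ts ih =>
    intro _ hmem
    cases ts with
    | nil =>
      have h0 : pySplitc c (p ++ ([] : List Char)) =
          (p ++ (pySplitc c ([] : List Char)).headI) :: (pySplitc c ([] : List Char)).tail :=
        ps_prepend c (hmem p (by simp)) []
      simpa [glue, pySplitc] using h0
    | cons q ps' =>
      rw [glue_cons c p (by simp), ps_prepend c (hmem p (by simp))]
      have hrec : pySplitc c (c :: glue c (q :: ps')) = [] :: pySplitc c (glue c (q :: ps')) :=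
        ps_cons_pos c _
      rw [hrec, ih (by simp) (fun x hx => hmem x (List.mem_cons_of_mem _ hx))]
      simp

theorem ps_concat_self (c : Char) (l : List Char) :
    pySplitc c (l ++ [c]) = pySplitc c l ++ [[]] := by
  have h1 : glue c (pySplitc c l ++ [[]]) = l ++ [c] := by
    rw [glue_concat c _ (ps_ne_nil c l), glue_ps]
  rw [← h1]
  apply ps_glue c _ (by simp)
  intro p hp
  rcases List.mem_append.1 hp with hp | hp
  · exact not_mem_ps c l p hp
  · simp at hp; simp [hp]

theorem ps_concat_ne (c : Char) {x : Char} (hx : x ≠ c) (l : List Char) :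
    pySplitc c (l ++ [x]) = (pySplitc c l).dropLast ++ [(pySplitc c l).getLastD [] ++ [x]] := by
  have hsplit := dropLast_getLastD (ps_ne_nil c l)
  set qs := (pySplitc c l).dropLast with hqs
  set r := (pySplitc c l).getLastD [] with hr
  have hmem : ∀ q ∈ qs ++ [r ++ [x]], c ∉ q := by
    intro q hq
    rcases List.mem_append.1 hq with hq | hq
    · exact not_mem_ps c l q (by rw [← hsplit]; exact List.mem_append_left _ hq)
    · simp at hq
      subst hq
      intro hc
      rcases List.mem_append.1 hc with hc | hc
      · exact not_mem_ps c l r (by rw [← hsplit]; exact List.mem_append_right _ (by simp)) hc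
      · simp at hc; exact hx hc.symm
  have hglue : glue c (qs ++ [r ++ [x]]) = l ++ [x] := by
    by_cases hq : qs = []
    · have hps : pySplitc c l = [r] := by rw [← hsplit, hq]; simp
      have hl : l = r := by
        conv_lhs => rw [← glue_ps c l, hps]
        exact glue_singleton c r
      rw [hq]; simp only [List.nil_append]; rw [hl, glue_singleton]
    · rw [glue_concat c _ hq]
      have h2 : glue c (qs ++ [r]) = l := by rw [hsplit, glue_ps]
      rw [glue_concat c _ hq] at h2
      rw [← h2]; simp
  rw [← hglue, ps_glue c _ (by simp) hmem]

theorem prefix_single (c : Char) (s : List Char) :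
    List.isPrefixOf [c] s = true ↔ s[0]? = some c := by
  cases s with
  | nil =>
    constructor
    · intro h; simp [List.isPrefixOf] at h
    · intro h; simp at h
  | cons x t => simp [List.isPrefixOf_iff_prefix, List.cons_prefix_iff]

-- splitOn for a single-char separator computes pySplitc
def consHead (p : List Char) : List (List Char) → List (List Char)
  | [] => [p]
  | h :: t => (p ++ h) :: t

theorem splitOn_go (c : Char) : ∀ (l : List Char) (fuel : Nat) (cur : List Char)
    (acc : List (List Char)), l.length ≤ fuel →
    PySem.Chars.splitOn.go [c] fuel l cur acc = acc.reverse ++ consHead cur.reverse (pySplitc c l) := by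
  intro l
  induction l with
  | nil =>
    intro fuel cur acc _
    cases fuel with
    | zero => simp [PySem.Chars.splitOn.go, consHead, pySplitc]
    | succ n => simp [PySem.Chars.splitOn.go, consHead, pySplitc]
  | cons x rest ih =>
    intro fuel cur acc hle
    cases fuel with
    | zero => simp at hle
    | succ n =>
      have hunf : PySem.Chars.splitOn.go [c] (n + 1) (x :: rest) cur acc =
          if List.isPrefixOf [c] (x :: rest) = true then
            PySem.Chars.splitOn.go [c] n (List.drop (List.length [c]) (x :: rest)) []
              (cur.reverse :: acc)
          else PySem.Chars.splitOn.go [c] n rest (x :: cur) acc := rfl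
      have hrest : rest.length ≤ n := by simp at hle; omega
      by_cases hx : x = c
      · subst hx
        rw [hunf, if_pos (by rw [prefix_single]; simp)]
        simp only [List.length_cons, List.length_nil, List.drop_succ_cons, List.drop_zero]
        rw [ih n [] (cur.reverse :: acc) hrest, ps_cons_pos]
        rcases hps : pySplitc x rest with _ | ⟨h, t⟩
        · exact absurd hps (ps_ne_nil x rest)
        · simp [consHead]
      · rw [hunf, if_neg (by rw [prefix_single]; simp only [List.getElem?_cons_zero, Option.some.injEq]; first | exact fun hc => hx hc | exact fun hc => hx hc.symm)]
        rw [ih n (x :: cur) acc hrest, ps_cons_neg hx]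
        rcases hps : pySplitc c rest with _ | ⟨h, t⟩
        · exact absurd hps (ps_ne_nil c rest)
        · simp [consHead]

theorem splitOn_single (c : Char) (l : List Char) :
    PySem.Chars.splitOn l [c] = pySplitc c l := by
  have := splitOn_go c l (l.length + 1) [] [] (by omega)
  rw [PySem.Chars.splitOn, this]
  rcases h : pySplitc c l with _ | ⟨p, t⟩
  · exact absurd h (ps_ne_nil c l)
  · simp [consHead]

theorem find_go_eq (c : Char) : ∀ (s : List Char) (k : Nat) (i : Nat), s[i]? = some c →
    (∀ m, m < i → s[m]? ≠ some c) → PySem.Chars.find.go [c] s k = (k : Int) + i := by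
  intro s
  induction s with
  | nil => intro k i hi _; simp at hi
  | cons x t ih =>
    intro k i hi hbef
    have hunf : PySem.Chars.find.go [c] (x :: t) k =
        if List.isPrefixOf [c] (x :: t) = true then (k : Int)
        else PySem.Chars.find.go [c] t (k + 1) := rfl
    by_cases hx : x = c
    · have hi0 : i = 0 := by
        by_contra h
        exact hbef 0 (Nat.pos_of_ne_zero h) (by simp [hx])
      subst hi0
      rw [hunf, if_pos (by rw [prefix_single]; simp [hx])]
      simp
    · have hi0 : i ≠ 0 := by rintro rfl; simp at hi; exact hx hi
      obtain ⟨i', rfl⟩ : ∃ i', i = i' + 1 := ⟨i - 1, by omega⟩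
      rw [hunf, if_neg (by rw [prefix_single]; simp only [List.getElem?_cons_zero, Option.some.injEq]; first | exact fun hc => hx hc | exact fun hc => hx hc.symm)]
      have hi' : t[i']? = some c := by simpa using hi
      have hbef' : ∀ m, m < i' → t[m]? ≠ some c := by
        intro m hm
        have := hbef (m + 1) (by omega)
        simpa using this
      rw [ih (k + 1) i' hi' hbef']
      push_cast
      ring

theorem rfind_go_eq (c : Char) (s : List Char) : ∀ (j : Nat) (i : Nat), i ≤ j →
    s[i]? = some c → (∀ m, i < m → m ≤ j → s[m]? ≠ some c) →
    PySem.Chars.rfind.go s [c] j = (i : Int) := by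
  intro j
  induction j with
  | zero =>
    intro i hij hi _
    have hi0 : i = 0 := by omega
    subst hi0
    have hunf : PySem.Chars.rfind.go s [c] 0 =
        if List.isPrefixOf [c] s = true then (0 : Int) else -1 := rfl
    rw [hunf, if_pos ((prefix_single c s).2 hi)]
    simp
  | succ n ih =>
    intro i hij hi haft
    have hunf : PySem.Chars.rfind.go s [c] (n + 1) =
        if List.isPrefixOf [c] (List.drop (n + 1) s) = true then ((n + 1 : Nat) : Int)
        else PySem.Chars.rfind.go s [c] n := rfl
    have hdrop : List.isPrefixOf [c] (List.drop (n + 1) s) = true ↔ s[n + 1]? = some c := by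
      rw [prefix_single, List.getElem?_drop, Nat.add_zero]
    by_cases hc : s[n + 1]? = some c
    · have hieq : i = n + 1 := by
        by_contra h
        exact haft (n + 1) (by omega) (le_refl _) hc
      subst hieq
      rw [hunf, if_pos (hdrop.2 hc)]
    · have hin : i ≤ n := by
        rcases Nat.lt_succ_iff_lt_or_eq.mp (Nat.lt_succ_of_le hij) with h | h
        · omega
        · exact absurd (h ▸ hi) hc
      rw [hunf, if_neg (fun hp => hc (hdrop.1 hp))]
      exact ih i hin hi (fun m h1 h2 => haft m h1 (by omega))

-- decomposition of a list with at least two occurrences of c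
theorem decomp (c : Char) (l : List Char) (h : 2 ≤ l.count c) :
    ∃ A0 qs r, pySplitc c l = A0 :: (qs ++ [r]) ∧ qs ≠ [] ∧
      l = A0 ++ c :: (glue c qs ++ c :: r) := by
  have hlen := length_ps c l
  rcases hps : pySplitc c l with _ | ⟨A0, t⟩
  · exact absurd hps (ps_ne_nil c l)
  have ht2 : 2 ≤ t.length := by rw [hps] at hlen; simp at hlen; omega
  have ht : t ≠ [] := by intro h0; rw [h0] at ht2; simp at ht2
  have hsplit := dropLast_getLastD ht
  have hqs : t.dropLast ≠ [] := by
    intro h0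
    have := congrArg List.length hsplit
    rw [h0] at this
    simp at this
    omega
  refine ⟨A0, t.dropLast, t.getLastD [], ?_, hqs, ?_⟩
  · exact congrArg (A0 :: ·) hsplit.symm
  · conv_lhs => rw [← glue_ps c l, hps]
    rw [glue_cons c A0 ht]
    conv_lhs => rw [← hsplit]
    rw [glue_concat c _ hqs]

theorem find_val (c : Char) (l : List Char) (h : 2 ≤ l.count c) :
    PySem.Chars.find l [c] = ((pySplitc c l).headI.length : Int) := by
  obtain ⟨A0, qs, r, hps, hqs, hl⟩ := decomp c l h
  have hA0 : c ∉ A0 := not_mem_ps c l A0 (by rw [hps]; simp)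
  have hfind : PySem.Chars.find l [c] = PySem.Chars.find.go [c] l 0 := rfl
  rw [hfind, find_go_eq c l 0 A0.length ?hi ?hb]
  · rw [hps]; simp
  case hi =>
    rw [hl, List.getElem?_append_right (le_refl _)]
    simp
  case hb =>
    intro m hm
    rw [hl, List.getElem?_append_left hm]
    intro hmem
    exact hA0 (List.mem_of_getElem? hmem)

theorem rfind_val (c : Char) (l : List Char) (h : 2 ≤ l.count c) :
    PySem.Chars.rfind l [c] = (l.length : Int) - ((pySplitc c l).getLastD []).length - 1 := by
  obtain ⟨A0, qs, r, hps, hqs, hl⟩ := decomp c l h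
  have hr : c ∉ r := not_mem_ps c l r (by rw [hps]; simp)
  have hl' : l = (A0 ++ c :: glue c qs) ++ c :: r := by rw [hl]; simp
  set u := A0 ++ c :: glue c qs with hu
  have hlen : l.length = u.length + 1 + r.length := by rw [hl']; simp; omega
  have hrfind : PySem.Chars.rfind l [c] = PySem.Chars.rfind.go l [c] l.length := rfl
  rw [hrfind, rfind_go_eq c l l.length u.length (by omega) ?hi ?ha]
  · have hgl : (pySplitc c l).getLastD [] = r := by
      rw [hps, List.getLastD_cons, List.getLastD_concat]
    rw [hgl]
    omega
  case hi =>
    rw [hl', List.getElem?_append_right (le_refl _)]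
    simp
  case ha =>
    intro m h1 h2
    rcases Nat.lt_or_ge m l.length with hm | hm
    · rw [hl', List.getElem?_append_right (by omega)]
      obtain ⟨m', hm'⟩ : ∃ m', m - u.length = m' + 1 := ⟨m - u.length - 1, by omega⟩
      rw [hm', List.getElem?_cons_succ]
      intro hmem
      exact hr (List.mem_of_getElem? hmem)
    · rw [List.getElem?_eq_none hm]
      simp

theorem valA_eq (txt : String) (c : Char) (h : 2 ≤ txt.toList.count c) :
    valA txt (String.ofList [c]) = gmaxI c txt.toList := by
  obtain ⟨A0, qs, r, hps, hqs, hl⟩ := decomp c txt.toList h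
  have hqmem : ∀ q ∈ qs, c ∉ q := fun q hq =>
    not_mem_ps c txt.toList q (by rw [hps]; simp [hq])
  have htl : (String.ofList [c]).toList = [c] := String.toList_ofList
  have hfind : PySem.Str.find txt (String.ofList [c]) = ((A0.length : Nat) : Int) := by
    rw [PySem.Str.find_eq, htl, find_val c _ h, hps]
    rfl
  have hrfind : PySem.Str.rfind txt (String.ofList [c]) =
      ((A0.length + 1 + (glue c qs).length : Nat) : Int) := by
    rw [PySem.Str.rfind_eq, htl, rfind_val c _ h]
    have hgl : (pySplitc c txt.toList).getLastD [] = r := by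
      rw [hps, List.getLastD_cons, List.getLastD_concat]
    rw [hgl]
    have hlen : txt.toList.length = A0.length + 1 + ((glue c qs).length + 1 + r.length) := by
      rw [hl]; simp; omega
    rw [hlen]
    push_cast
    ring
  unfold valA
  rw [hfind, hrfind]
  have hsubs : (PySem.Str.slice txt (some ((A0.length : Nat) : Int))
      (some ((A0.length + 1 + (glue c qs).length : Nat) : Int))).toList = c :: glue c qs := by
    rw [PySem.Str.toList_slice, PySem.Chars.slice_eq_listSlice, PySem.List.slice_natCast]
    rw [show A0.length + 1 + (glue c qs).length - A0.length = (glue c qs).length + 1 from by omega]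
    rw [hl, List.drop_left, List.take_succ_cons, List.take_left]
  have hs := PySem.Str.split?_map (PySem.Str.slice txt (some ((A0.length : Nat) : Int))
      (some ((A0.length + 1 + (glue c qs).length : Nat) : Int))) (String.ofList [c])
  rw [htl, hsubs] at hs
  have hsp : PySem.Chars.split? (c :: glue c qs) [c] = some ([] :: qs) := by
    rw [PySem.Chars.split?]
    rw [if_neg (by simp)]
    rw [splitOn_single, ps_cons_pos, ps_glue c qs hqs hqmem]
  rw [hsp] at hs
  obtain ⟨ys, hys, hysmap⟩ := Option.map_eq_some_iff.mp hs
  rw [hys, Option.getD_some]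
  have hmap : ys.map (fun j => PySem.Str.len j) =
      (0 : Int) :: qs.map (fun p => (p.length : Int)) := by
    simp only [PySem.Str.len_eq]
    calc ys.map (fun j => ((j.toList.length : Nat) : Int))
        = (ys.map String.toList).map (fun p => ((p.length : Nat) : Int)) := by
          rw [List.map_map]; rfl
      _ = (0 : Int) :: qs.map (fun p => (p.length : Int)) := by rw [hysmap]; simp
  rw [hmap, PySem.List.max?_id_cons, Option.getD_some]
  unfold gmaxI
  rw [hps]
  simp only [List.tail_cons, List.dropLast_concat]

theorem interior_concat {α : Type} (ps : List α) (y : α) (h : ps ≠ []) :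
    (ps.dropLast ++ [y]).tail.dropLast = ps.tail.dropLast := by
  cases ps with
  | nil => exact absurd rfl h
  | cons a t =>
    cases t with
    | nil => simp
    | cons b u =>
      simp only [List.dropLast_cons₂, List.cons_append, List.tail_cons]
      rw [List.dropLast_concat]

theorem gmaxI_ne (c : Char) {x : Char} (hx : x ≠ c) (l : List Char) :
    gmaxI c (l ++ [x]) = gmaxI c l := by
  unfold gmaxI
  rw [ps_concat_ne c hx, interior_concat _ _ (ps_ne_nil c l)]

theorem foldl_max_concat (vs : List Int) (a b : Int) :
    (vs ++ [b]).foldl max a = max (vs.foldl max a) b := by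
  rw [List.foldl_append, List.foldl_cons, List.foldl_nil]

theorem gmaxI_self2 (c : Char) (l : List Char) (h : 2 ≤ l.count c) :
    gmaxI c (l ++ [c]) = max (gmaxI c l) (((pySplitc c l).getLastD []).length : Int) := by
  obtain ⟨A0, qs, r, hps, _, _⟩ := decomp c l h
  have hgl : (pySplitc c l).getLastD [] = r := by
    rw [hps, List.getLastD_cons, List.getLastD_concat]
  unfold gmaxI
  rw [ps_concat_self, hgl, hps]
  simp only [List.cons_append, List.tail_cons, List.dropLast_concat]
  rw [List.map_append,
    show (List.map (fun p : List Char => (p.length : Int)) [r]) = [(r.length : Int)] from rfl,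
    foldl_max_concat]

theorem gmaxI_self1 (c : Char) (l : List Char) (h : l.count c = 1) :
    gmaxI c (l ++ [c]) = (((pySplitc c l).getLastD []).length : Int) := by
  have hlen : (pySplitc c l).length = 2 := by rw [length_ps, h]
  rcases hps : pySplitc c l with _ | ⟨a, t⟩
  · exact absurd hps (ps_ne_nil c l)
  rcases t with _ | ⟨b, t'⟩
  · rw [hps] at hlen; simp at hlen
  rcases t' with _ | ⟨d, t''⟩
  · unfold gmaxI
    rw [ps_concat_self, hps]
    simp [List.getLastD_cons,
      max_eq_right (show (0 : Int) ≤ (b.length : Int) from by positivity)]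
  · rw [hps] at hlen; simp at hlen

theorem foldB_inv (l : List Char) :
    ((PySem.List.enumerate l 0).foldl stepB (PySem.Dict.empty, PySem.Dict.empty)).1.keys.Nodup ∧
    ((PySem.List.enumerate l 0).foldl stepB (PySem.Dict.empty, PySem.Dict.empty)).2.keys.Nodup ∧
    (∀ c, ((PySem.List.enumerate l 0).foldl stepB (PySem.Dict.empty, PySem.Dict.empty)).1.get? c =
      if c ∈ l then some ((l.length : Int) - ((pySplitc c l).getLastD []).length - 1) else none) ∧
    (∀ c, ((PySem.List.enumerate l 0).foldl stepB (PySem.Dict.empty, PySem.Dict.empty)).2.get? c =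
      if 2 ≤ l.count c then some (gmaxI c l) else none) := by
  induction l using List.reverseRecOn with
  | nil =>
    refine ⟨?_, ?_, ?_, ?_⟩ <;>
      simp [PySem.List.enumerate, PySem.Dict.keys_empty, PySem.Dict.get?_empty]
  | append_singleton xs x ih =>
    obtain ⟨ih1, ih2, ih3, ih4⟩ := ih
    have hF : (PySem.List.enumerate (xs ++ [x]) 0).foldl stepB (PySem.Dict.empty, PySem.Dict.empty) =
        stepB ((PySem.List.enumerate xs 0).foldl stepB (PySem.Dict.empty, PySem.Dict.empty))
          ((xs.length : Int), x) := by
      rw [PySem.List.enumerate_append, List.foldl_append, PySem.List.enumerate_cons]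
      simp [PySem.List.enumerate]
    set st := (PySem.List.enumerate xs 0).foldl stepB (PySem.Dict.empty, PySem.Dict.empty) with hstdef
    rw [hF]
    have hcon1 : st.1.contains x = decide (x ∈ xs) := by
      rw [PySem.Dict.contains_eq_isSome_get?, ih3 x]
      by_cases hx : x ∈ xs <;> simp [hx]
    have hcon2 : st.2.contains x = decide (2 ≤ xs.count x) := by
      rw [PySem.Dict.contains_eq_isSome_get?, ih4 x]
      by_cases hx : 2 ≤ xs.count x <;> simp [hx]
    have hstep : (stepB st ((xs.length : Int), x)).1 = st.1.insert x (xs.length : Int) := rfl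
    -- the last-position dict: identical reasoning in every branch
    have hlast : ∀ c, (st.1.insert x (xs.length : Int)).get? c =
        if c ∈ xs ++ [x] then
          some (((xs ++ [x]).length : Int) - ((pySplitc c (xs ++ [x])).getLastD []).length - 1)
        else none := by
      intro c
      rw [PySem.Dict.get?_insert]
      by_cases hcx : c = x
      · subst hcx
        rw [if_pos rfl, if_pos (by simp)]
        rw [ps_concat_self, List.getLastD_concat]
        simp
      · rw [if_neg hcx, ih3 c]
        have hxc : x ≠ c := fun he => hcx he.symm
        have hmm : (c ∈ xs ++ [x]) ↔ c ∈ xs := by simp [hcx]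
        by_cases hcm : c ∈ xs
        · rw [if_pos hcm, if_pos (hmm.mpr hcm)]
          rw [ps_concat_ne c hxc, List.getLastD_concat]
          simp only [List.length_append, List.length_cons, List.length_nil]
          congr 1
          push_cast
          ring
        · rw [if_neg hcm, if_neg (fun hcon => hcm (hmm.mp hcon))]
    -- gap dict: the unchanged-key reasoning, shared by every branch
    have hgapne : ∀ (gap2 : PySem.Dict Char Int),
        (∀ c, gap2.get? c = if 2 ≤ xs.count x + 1 ∧ c = x then some (gmaxI x (xs ++ [x]))
          else st.2.get? c) →
        ∀ c, gap2.get? c =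
          if 2 ≤ (xs ++ [x]).count c then some (gmaxI c (xs ++ [x])) else none := by
      intro gap2 hg c
      by_cases hcx : c = x
      · rw [hg c, hcx]
        have hcnt : (xs ++ [x]).count x = xs.count x + 1 := by simp
        by_cases h2 : 2 ≤ xs.count x + 1
        · rw [if_pos ⟨h2, rfl⟩, if_pos (by rw [hcnt]; omega)]
        · rw [if_neg (fun hco => h2 hco.1), if_neg (by rw [hcnt]; omega), ih4 x,
            if_neg (by omega)]
      · rw [hg c, if_neg (by tauto), ih4 c]
        have hxc : x ≠ c := fun he => hcx he.symm
        have h0 : List.count c [x] = 0 := List.count_eq_zero.mpr (by simp [hcx])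
        have hcnt : (xs ++ [x]).count c = xs.count c := by
          rw [List.count_append, h0, Nat.add_zero]
        rw [hcnt, gmaxI_ne c hxc]
    by_cases hmem : x ∈ xs
    · have hval : st.1.getD x 0 =
          (xs.length : Int) - ((pySplitc x xs).getLastD []).length - 1 := by
        rw [PySem.Dict.getD_eq_get?_getD, ih3 x, if_pos hmem, Option.getD_some]
      have hg : (xs.length : Int) - st.1.getD x 0 - 1 =
          (((pySplitc x xs).getLastD []).length : Int) := by rw [hval]; ring
      by_cases hc2 : 2 ≤ xs.count x
      · have hold : st.2.getD x 0 = gmaxI x xs := by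
          rw [PySem.Dict.getD_eq_get?_getD, ih4 x, if_pos hc2, Option.getD_some]
        have hgap2 : (stepB st ((xs.length : Int), x)).2 =
            if st.2.getD x 0 < (xs.length : Int) - st.1.getD x 0 - 1 then
              st.2.insert x ((xs.length : Int) - st.1.getD x 0 - 1) else st.2 := by
          simp only [stepB, hcon1, hcon2]
          simp [hmem, hc2]
        have hgmax : gmaxI x (xs ++ [x]) =
            max (gmaxI x xs) (((pySplitc x xs).getLastD []).length : Int) :=
          gmaxI_self2 x xs hc2
        refine ⟨?_, ?_, ?_, ?_⟩
        · rw [hstep]; exact PySem.Dict.nodup_keys_insert _ _ _ ih1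
        · rw [hgap2]; split_ifs
          · exact PySem.Dict.nodup_keys_insert _ _ _ ih2
          · exact ih2
        · rw [hstep]; exact hlast
        · apply hgapne
          intro c
          rw [hgap2]
          by_cases hcx : c = x
          · rw [if_pos (And.intro (by omega) hcx)]
            split_ifs with hlt
            · rw [hcx, PySem.Dict.get?_insert, if_pos rfl, hgmax]
              rw [hg] at hlt
              rw [hold] at hlt
              rw [hg, max_eq_right (le_of_lt hlt)]
            · rw [hcx, ih4 x, if_pos hc2, hgmax]
              rw [hg] at hlt
              rw [hold] at hlt
              rw [max_eq_left (by omega)]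
          · rw [if_neg (show ¬(2 ≤ List.count x xs + 1 ∧ c = x) from fun hco => hcx hco.2)]
            split_ifs
            · rw [PySem.Dict.get?_insert, if_neg hcx]
            · rfl
      · have hc1 : xs.count x = 1 := by
          have := List.count_pos_iff.mpr hmem
          omega
        have hgap2 : (stepB st ((xs.length : Int), x)).2 =
            st.2.insert x ((xs.length : Int) - st.1.getD x 0 - 1) := by
          simp only [stepB, hcon1, hcon2]
          simp [hmem, hc2]
        refine ⟨?_, ?_, ?_, ?_⟩
        · rw [hstep]; exact PySem.Dict.nodup_keys_insert _ _ _ ih1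
        · rw [hgap2]; exact PySem.Dict.nodup_keys_insert _ _ _ ih2
        · rw [hstep]; exact hlast
        · apply hgapne
          intro c
          rw [hgap2, PySem.Dict.get?_insert]
          by_cases hcx : c = x
          · rw [if_pos hcx, if_pos (And.intro (by omega) hcx), hg, gmaxI_self1 x xs hc1]
          · rw [if_neg hcx, if_neg (fun hco => hcx hco.2)]
    · have hgap2 : (stepB st ((xs.length : Int), x)).2 = st.2 := by
        simp only [stepB, hcon1]
        simp [hmem]
      have hc0 : xs.count x = 0 := List.count_eq_zero.mpr hmem
      refine ⟨?_, ?_, ?_, ?_⟩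
      · rw [hstep]; exact PySem.Dict.nodup_keys_insert _ _ _ ih1
      · rw [hgap2]; exact ih2
      · rw [hstep]; exact hlast
      · apply hgapne
        intro c
        rw [hgap2]
        by_cases hcx : c = x
        · rw [if_neg (fun hcon => absurd hcon.1 (by omega))]
        · rw [if_neg (fun hco => hcx hco.2)]

theorem sel (val : String → Int) : ∀ (li : List String) (out : List String) (len : Int),
    li.foldl (fun st i => if val i > st.2 then ([i], val i)
      else if val i == st.2 then (st.1 ++ [i], st.2) else st) (out, len) =
    ((if len < (li.map val).foldl max len then [] else out) ++
      li.filter (fun i => val i == (li.map val).foldl max len),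
     (li.map val).foldl max len) := by
  intro li
  induction li with
  | nil => intro out len; simp
  | cons i rest ih =>
    intro out len
    rw [List.foldl_cons, List.map_cons, List.foldl_cons]
    by_cases h1 : val i > len
    · rw [if_pos h1, ih [i] (val i),
        show max len (val i) = val i from max_eq_right (le_of_lt h1)]
      have hvle : val i ≤ (rest.map val).foldl max (val i) :=
        (PySem.List.le_foldl_max (rest.map val) (val i)).1
      have hlM : len < (rest.map val).foldl max (val i) := lt_of_lt_of_le h1 hvle
      rw [List.filter_cons, if_pos hlM]
      by_cases h2 : val i = (rest.map val).foldl max (val i)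
      · rw [if_neg (show ¬(val i < (rest.map val).foldl max (val i)) from by omega),
          if_pos (show (val i == (rest.map val).foldl max (val i)) = true from by
            simp only [beq_iff_eq]; omega)]
        simp
      · rw [if_pos (show val i < (rest.map val).foldl max (val i) from by omega),
          if_neg (show ¬((val i == (rest.map val).foldl max (val i)) = true) from by
            simp only [beq_iff_eq]; omega)]
    · by_cases h2 : val i == len
      · have h2' : val i = len := by simpa using h2
        rw [if_neg h1, if_pos h2, ih (out ++ [i]) len,
          show max len (val i) = len from max_eq_left (by omega), List.filter_cons]
        by_cases h3 : len < (rest.map val).foldl max len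
        · rw [if_pos h3,
            if_neg (show ¬((val i == (rest.map val).foldl max len) = true) from by
              simp only [beq_iff_eq]; omega)]
          rw [if_pos h3]
        · have hle := (PySem.List.le_foldl_max (rest.map val) len).1
          have h4 : (rest.map val).foldl max len = len := by omega
          rw [if_neg h3,
            if_pos (show (val i == (rest.map val).foldl max len) = true from by
              simp only [beq_iff_eq]; omega)]
          rw [if_neg h3]
          simp
      · have h2' : val i ≠ len := by simpa using h2
        rw [if_neg h1, if_neg h2, ih out len,
          show max len (val i) = len from max_eq_left (by omega), List.filter_cons]
        have hle := (PySem.List.le_foldl_max (rest.map val) len).1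
        rw [if_neg (show ¬((val i == (rest.map val).foldl max len) = true) from by
          simp only [beq_iff_eq]; omega)]

theorem foldl_max_mem (vs : List Int) : ∀ a, vs.foldl max a ∈ vs ∨ vs.foldl max a = a := by
  induction vs with
  | nil => intro a; right; rfl
  | cons v t ih =>
    intro a
    rw [List.foldl_cons]
    rcases ih (max a v) with h | h
    · left; exact List.mem_cons_of_mem _ h
    · rcases max_choice a v with hm | hm
      · right; rw [h, hm]
      · left; rw [h, hm]; exact List.mem_cons_self

theorem ofList_single_injective : Function.Injective (fun ch => String.ofList [ch]) := by
  intro a b hab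
  have := congrArg String.toList hab
  simpa using this

-- ===== VERDICT (by name: the statement is the Claim_ definition above) =====
theorem max_separator_spec : Claim_equal_max_separator := by
  intro txt _
  unfold Spec_max_separator
  obtain ⟨hn1, hn2, h3, h4⟩ := foldB_inv txt.toList
  set gapd := ((PySem.List.enumerate txt.toList 0).foldl stepB
    (PySem.Dict.empty, PySem.Dict.empty)).2 with hgapd
  set chars := txt.toList.map (fun ch => String.ofList [ch]) with hchars
  set li := PySem.Set.ofList (chars.filter (fun x => chars.count x > 1)) with hli
  have hA : max_separator txt =
      PySem.List.sorted
        ((li.foldl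
          (fun (st : List String × Int) i =>
            if valA txt i > st.2 then ([i], valA txt i)
            else if valA txt i == st.2 then (st.1 ++ [i], st.2) else st) ([], 0)).1)
        (fun x => x) false := rfl
  have hB : max_separator_alt txt =
      (if gapd.size = 0 then []
       else PySem.List.sorted
        ((gapd.items.filter (fun p =>
            p.2 == (PySem.List.max? gapd.values (fun x => x)).getD 0)).map
          (fun p => String.ofList [p.1])) (fun x => x) false) := rfl
  rw [hA, sel (valA txt) li [] 0, hB]
  simp only [ite_self, List.nil_append]
  set M := (li.map (valA txt)).foldl max 0 with hM
  -- membership characterisations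
  have hmemli : ∀ s, s ∈ li ↔ ∃ c, 2 ≤ txt.toList.count c ∧ s = String.ofList [c] := by
    intro s
    rw [hli, PySem.Set.mem_ofList, List.mem_filter]
    constructor
    · rintro ⟨hs, hcnt⟩
      obtain ⟨c, hc, rfl⟩ := List.mem_map.mp hs
      refine ⟨c, ?_, rfl⟩
      rw [hchars, List.count_map_of_injective _ _ ofList_single_injective] at hcnt
      simp at hcnt
      omega
    · rintro ⟨c, hc2, rfl⟩
      have hcmem : c ∈ txt.toList := List.count_pos_iff.mp (by omega)
      refine ⟨List.mem_map_of_mem hcmem, ?_⟩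
      rw [hchars, List.count_map_of_injective _ _ ofList_single_injective]
      simp
      omega
  have hkeys : ∀ c, c ∈ gapd.keys ↔ 2 ≤ txt.toList.count c := by
    intro c
    rw [← PySem.Dict.contains_iff_mem_keys, PySem.Dict.contains_eq_isSome_get?, h4 c]
    by_cases h : 2 ≤ txt.toList.count c <;> simp [h]
  have hgetD : ∀ c, 2 ≤ txt.toList.count c → gapd.getD c 0 = gmaxI c txt.toList := by
    intro c hc
    rw [PySem.Dict.getD_eq_get?_getD, h4 c, if_pos hc, Option.getD_some]
  by_cases hex : ∃ c, 2 ≤ txt.toList.count c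
  · obtain ⟨c0, hc0⟩ := hex
    have hkne : gapd.keys ≠ [] := fun hnil => by
      have := (hkeys c0).mpr hc0
      rw [hnil] at this
      simp at this
    have hsz : ¬gapd.size = 0 := by
      intro h0
      apply hkne
      have : gapd.items = [] := List.length_eq_zero_iff.mp h0
      show gapd.items.map Prod.fst = []
      rw [this]
      rfl
    rw [if_neg hsz]
    -- the maximum value agrees
    have hitems : gapd.items = gapd.keys.map (fun k => (k, gapd.getD k 0)) :=
      PySem.Dict.items_eq_map_keys gapd hn2 0
    have hvals : gapd.values = gapd.keys.map (fun k => gapd.getD k 0) :=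
      PySem.Dict.values_eq_map_keys gapd hn2 0
    have hvalsne : gapd.values ≠ [] := by
      rw [hvals]
      exact fun hnil => hkne (List.map_eq_nil_iff.mp hnil)
    rcases hmax : PySem.List.max? gapd.values (fun x => x) with _ | mv
    · exfalso
      rw [PySem.List.max?_eq_none_iff] at hmax
      exact hvalsne hmax
    have hmv_mem : mv ∈ gapd.values := PySem.List.max?_mem hmax
    have hmv_max : ∀ y ∈ gapd.values, y ≤ mv := fun y hy =>
      PySem.List.max?_isMax hmax y hy
    have hval_of_key : ∀ c, c ∈ gapd.keys → gapd.getD c 0 = valA txt (String.ofList [c]) := by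
      intro c hc
      rw [hgetD c ((hkeys c).mp hc), valA_eq txt c ((hkeys c).mp hc)]
    have hle_M : ∀ s ∈ li, valA txt s ≤ M :=
      fun s hs => (PySem.List.le_foldl_max (li.map (valA txt)) 0).2 _
        (List.mem_map_of_mem hs)
    have hmvM : mv = M := by
      apply le_antisymm
      · rw [hvals] at hmv_mem
        obtain ⟨c, hc, rfl⟩ := List.mem_map.mp hmv_mem
        rw [hval_of_key c hc]
        exact hle_M _ ((hmemli _).mpr ⟨c, (hkeys c).mp hc, rfl⟩)
      · rcases foldl_max_mem (li.map (valA txt)) 0 with hMm | hM0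
        · obtain ⟨s, hs, hsval⟩ := List.mem_map.mp hMm
          obtain ⟨c, hc2, rfl⟩ := (hmemli s).mp hs
          rw [hM, ← hsval, valA_eq txt c hc2, ← hgetD c hc2]
          exact hmv_max _ (by rw [hvals]; exact List.mem_map_of_mem ((hkeys c).mpr hc2))
        · have h0 : M = 0 := by rw [hM]; exact hM0
          rw [h0]
          have h0le : (0 : Int) ≤ gapd.getD c0 0 := by
            rw [hgetD c0 hc0]
            exact (PySem.List.le_foldl_max _ 0).1
          exact le_trans h0le (hmv_max _ (by
            rw [hvals]; exact List.mem_map_of_mem ((hkeys c0).mpr hc0)))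
    -- the filtered lists are permutations of each other
    rw [Option.getD_some, hitems, List.filter_map, List.map_map]
    apply PySem.List.sorted_eq_sorted_of_perm _ _ (fun x => x) (fun a b h => h)
    apply (List.perm_ext_iff_of_nodup ((PySem.Set.nodup_ofList _).filter _)
      (List.Nodup.map (fun a b hab => by simpa using congrArg String.toList hab)
        (hn2.filter _))).mpr
    intro s
    rw [List.mem_filter, List.mem_map]
    constructor
    · rintro ⟨hs, hval⟩
      obtain ⟨c, hc2, rfl⟩ := (hmemli s).mp hs
      refine ⟨c, List.mem_filter.mpr ⟨(hkeys c).mpr hc2, ?_⟩, rfl⟩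
      simp only [Function.comp_apply, beq_iff_eq] at hval ⊢
      rw [hval_of_key c ((hkeys c).mpr hc2), hval, hmvM]
    · rintro ⟨c, hc, rfl⟩
      obtain ⟨hck, hcv⟩ := List.mem_filter.mp hc
      refine ⟨(hmemli _).mpr ⟨c, (hkeys c).mp hck, rfl⟩, ?_⟩
      simp only [Function.comp_apply, beq_iff_eq] at hcv ⊢
      rw [← hval_of_key c hck, hcv, hmvM]
  · have hlinil : li = [] := List.eq_nil_iff_forall_not_mem.mpr (fun s hs => by
      obtain ⟨c, hc, _⟩ := (hmemli s).mp hs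
      exact hex ⟨c, hc⟩)
    have hknil : gapd.keys = [] := List.eq_nil_iff_forall_not_mem.mpr (fun c hc =>
      hex ⟨c, (hkeys c).mp hc⟩)
    have hsz : gapd.size = 0 := by
      have hit : gapd.items = [] := List.map_eq_nil_iff.mp hknil
      show gapd.items.length = 0
      rw [hit]
      rfl
    rw [if_pos hsz, hlinil]
    rfl
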